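-- pv_equiv track=rewrite | github.com/meerkatone/raptor | packages/cve_diff/cve_diff/agent/source_classes.py | tried_classes
-- ===== SOURCE A (Python) =====
-- SOURCE_CLASSES: dict[str, frozenset[str]] = {
--     "osv": frozenset({"osv_raw", "osv_expand_aliases"}),
--     "nvd": frozenset({"nvd_raw"}),
--     "deterministic_hints": frozenset({"deterministic_hints"}),
--     "github_search": frozenset({
--         "gh_search_repos", "gh_search_commits", "gh_list_commits_by_path",
--     }),
--     "distro_trackers": frozenset({"fetch_distro_advisory"}),
--     "non_github_forge": frozenset({"git_ls_remote", "gitlab_commit", "cgit_fetch"}),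
--     "generic_http": frozenset({"http_fetch"}),
-- }
--
-- def tried_classes(tool_call_log: list[str]) -> frozenset[str]:
--     """Set of source classes the agent has already invoked."""
--     tried: set[str] = set()
--     for call in tool_call_log:
--         for cls, tools in SOURCE_CLASSES.items():
--             if call in tools:
--                 tried.add(cls)
--                 break
--     return frozenset(tried)
-- ===== SOURCE B (Python) =====
-- SOURCE_CLASSES: dict[str, frozenset[str]] = {
--     "osv": frozenset({"osv_raw", "osv_expand_aliases"}),
--     "nvd": frozenset({"nvd_raw"}),
--     "deterministic_hints": frozenset({"deterministic_hints"}),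
--     "github_search": frozenset({
--         "gh_search_repos", "gh_search_commits", "gh_list_commits_by_path",
--     }),
--     "distro_trackers": frozenset({"fetch_distro_advisory"}),
--     "non_github_forge": frozenset({"git_ls_remote", "gitlab_commit", "cgit_fetch"}),
--     "generic_http": frozenset({"http_fetch"}),
-- }
--
-- _TOOL_TO_CLASS = {
--     tool: cls for cls, tools in SOURCE_CLASSES.items() for tool in tools
-- }
--
-- def tried_classes(tool_call_log: list[str]) -> frozenset[str]:
--     """Set of source classes the agent has already invoked."""
--     tried: set[str] = set()
--     for call in tool_call_log:
--         cls = _TOOL_TO_CLASS.get(call)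
--         if cls is not None:
--             tried.add(cls)
--     return frozenset(tried)
-- ===== Notes on version B (the rewrite author's own statement) =====
-- stated objective: faster
-- what changed: B materializes a reverse index (tool name -> class name) from SOURCE_CLASSES once, then makes a single pass over the log with one dict lookup per call; A's inner scan-and-break over the class table disappears.
import Mathlib
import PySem

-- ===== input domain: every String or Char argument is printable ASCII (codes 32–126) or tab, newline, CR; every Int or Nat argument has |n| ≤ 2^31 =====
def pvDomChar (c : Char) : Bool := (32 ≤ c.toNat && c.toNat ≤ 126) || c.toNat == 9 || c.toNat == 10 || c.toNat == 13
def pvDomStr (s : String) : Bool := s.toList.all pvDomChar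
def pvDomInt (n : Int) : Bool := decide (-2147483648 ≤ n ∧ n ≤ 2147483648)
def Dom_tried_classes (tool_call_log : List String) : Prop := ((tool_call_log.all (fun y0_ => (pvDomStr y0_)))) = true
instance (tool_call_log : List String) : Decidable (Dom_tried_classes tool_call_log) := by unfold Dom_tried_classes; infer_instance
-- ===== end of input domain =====

-- B replaces A's per-call scan-and-break over the class table with a one-time reverse index
-- (tool name -> class name) and a single dict lookup per call; objective: simpler.

-- ===== PORT A =====
-- SOURCE_CLASSES: insertion-ordered dict of class name -> frozenset of tool names (PySem.Set)
def sourceClasses : List (String × List String) :=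
  [("osv", ["osv_raw", "osv_expand_aliases"]),
   ("nvd", ["nvd_raw"]),
   ("deterministic_hints", ["deterministic_hints"]),
   ("github_search", ["gh_search_repos", "gh_search_commits", "gh_list_commits_by_path"]),
   ("distro_trackers", ["fetch_distro_advisory"]),
   ("non_github_forge", ["git_ls_remote", "gitlab_commit", "cgit_fetch"]),
   ("generic_http", ["http_fetch"])]

-- A's inner loop: 'for cls, tools in SOURCE_CLASSES.items(): if call in tools: tried.add(cls); break'
def scanClasses (call : String) (items : List (String × List String)) (tried : PySem.Set String) : PySem.Set String :=
  match items with
  | [] => tried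
  | (cls, tools) :: rest =>
    if PySem.Set.contains tools call then PySem.Set.add tried cls
    else scanClasses call rest tried

def tried_classes (tool_call_log : List String) : List String :=
  tool_call_log.foldl (fun tried call => scanClasses call sourceClasses tried) PySem.Set.empty

-- ===== PORT B =====
-- _TOOL_TO_CLASS = {tool: cls for cls, tools in SOURCE_CLASSES.items() for tool in tools}
def toolToClass : PySem.Dict String String :=
  sourceClasses.foldl (fun d p => p.2.foldl (fun d t => d.insert t p.1) d) PySem.Dict.empty

-- single pass: cls = _TOOL_TO_CLASS.get(call); if cls is not None: tried.add(cls)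
def tried_classes_alt (tool_call_log : List String) : List String :=
  tool_call_log.foldl (fun tried call =>
    match toolToClass.get? call with
    | some cls => PySem.Set.add tried cls
    | none => tried) PySem.Set.empty

-- ===== PRECONDITION & SPEC =====
def Spec_tried_classes (tool_call_log : List String) (out : List String) : Prop := out = tried_classes_alt tool_call_log
instance (tool_call_log : List String) (out : List String) : Decidable (Spec_tried_classes tool_call_log out) := by unfold Spec_tried_classes; infer_instance

-- ===== CLAIM (what is proved, stated in full; the proofs are below) =====
def Claim_equal_tried_classes : Prop := ∀ (tool_call_log : List String), Dom_tried_classes tool_call_log → Spec_tried_classes tool_call_log (tried_classes tool_call_log)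

-- ===== LEMMAS AND PROOFS =====

-- the reverse index, spelled out (used to evaluate B's lookup in the default branch of step_eq)
theorem ttc_eq : toolToClass = PySem.Dict.mk
  [("osv_raw","osv"),("osv_expand_aliases","osv"),("nvd_raw","nvd"),
   ("deterministic_hints","deterministic_hints"),("gh_search_repos","github_search"),
   ("gh_search_commits","github_search"),("gh_list_commits_by_path","github_search"),
   ("fetch_distro_advisory","distro_trackers"),("git_ls_remote","non_github_forge"),
   ("gitlab_commit","non_github_forge"),("cgit_fetch","non_github_forge"),
   ("http_fetch","generic_http")] := by decide

-- Per-call step: A's first-match scan over the class table equals B's reverse-index lookup.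
theorem step_eq (call : String) (tried : PySem.Set String) :
    scanClasses call sourceClasses tried =
      (match toolToClass.get? call with
       | some cls => PySem.Set.add tried cls
       | none => tried) := by
  by_cases h1 : "osv_raw" = call
  · subst h1; rfl
  by_cases h2 : "osv_expand_aliases" = call
  · subst h2; rfl
  by_cases h3 : "nvd_raw" = call
  · subst h3; rfl
  by_cases h4 : "deterministic_hints" = call
  · subst h4; rfl
  by_cases h5 : "gh_search_repos" = call
  · subst h5; rfl
  by_cases h6 : "gh_search_commits" = call
  · subst h6; rfl
  by_cases h7 : "gh_list_commits_by_path" = call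
  · subst h7; rfl
  by_cases h8 : "fetch_distro_advisory" = call
  · subst h8; rfl
  by_cases h9 : "git_ls_remote" = call
  · subst h9; rfl
  by_cases h10 : "gitlab_commit" = call
  · subst h10; rfl
  by_cases h11 : "cgit_fetch" = call
  · subst h11; rfl
  by_cases h12 : "http_fetch" = call
  · subst h12; rfl
  simp [ttc_eq, scanClasses, sourceClasses, PySem.Set.contains, PySem.Dict.get?, beq_iff_eq, h1, Ne.symm h1, h2, Ne.symm h2, h3, Ne.symm h3, h4, Ne.symm h4, h5, Ne.symm h5, h6, Ne.symm h6, h7, Ne.symm h7, h8, Ne.symm h8, h9, Ne.symm h9, h10, Ne.symm h10, h11, Ne.symm h11, h12, Ne.symm h12]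

theorem fold_eq (log : List String) (tried : PySem.Set String) :
    log.foldl (fun tried call => scanClasses call sourceClasses tried) tried =
      log.foldl (fun tried call =>
        match toolToClass.get? call with
        | some cls => PySem.Set.add tried cls
        | none => tried) tried := by
  induction log generalizing tried with
  | nil => rfl
  | cons c rest ih => simpa only [List.foldl, step_eq] using ih _

-- ===== VERDICT (by name: the statement is the Claim_ definition above) =====
theorem tried_classes_spec : Claim_equal_tried_classes := by
  intro log _
  unfold Spec_tried_classes tried_classes tried_classes_alt
  exact fold_eq log PySem.Set.empty
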